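-- pv_equiv track=rewrite | github.com/polyphony-dev/polyphony | tests/loop/while03.py | while03
-- ===== SOURCE A (Python) =====
-- def while03(x):
--     s1 = 0
--     s2 = 0
--     i = 0
--     while i < x:
--         s1 += 1
--         if i == 5:
--             i += 1
--             continue
--         s2 += 2
--         i += 1
--     return s1 + s2
-- ===== SOURCE B (Python) =====
-- def while03(x):
--     s1 = max(x, 0)
--     s2 = 2 * s1 - (2 if x >= 6 else 0)
--     return s1 + s2
-- ===== Notes on version B (the rewrite author's own statement) =====
-- stated objective: faster
-- what changed: Replaced the O(x) while-loop with closed-form arithmetic: s1 = max(x,0), s2 = 2*s1 minus 2 when the skipped iteration i==5 occurs (x >= 6).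
import Mathlib
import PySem

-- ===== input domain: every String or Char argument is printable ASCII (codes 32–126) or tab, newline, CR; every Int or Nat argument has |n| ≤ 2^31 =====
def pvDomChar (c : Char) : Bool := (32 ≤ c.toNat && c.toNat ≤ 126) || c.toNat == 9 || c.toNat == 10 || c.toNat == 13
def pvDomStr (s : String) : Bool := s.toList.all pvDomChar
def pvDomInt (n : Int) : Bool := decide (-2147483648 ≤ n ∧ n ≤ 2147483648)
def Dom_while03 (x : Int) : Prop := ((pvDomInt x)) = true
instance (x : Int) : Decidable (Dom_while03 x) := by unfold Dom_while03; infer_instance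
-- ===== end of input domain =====

-- B replaces the O(x) counting loop by closed-form arithmetic (faster, asymptotic).

-- ===== PORT A =====
-- literal port of A's while loop; state (s1, s2, i), terminates since x - i shrinks
def while03Loop (x s1 s2 i : Int) : Int :=
  if _h : i < x then
    if i = 5 then while03Loop x (s1 + 1) s2 (i + 1)
    else while03Loop x (s1 + 1) (s2 + 2) (i + 1)
  else s1 + s2
termination_by (x - i).toNat
decreasing_by all_goals omega

def while03 (x : Int) : Int := while03Loop x 0 0 0

-- ===== PORT B =====
def while03_alt (x : Int) : Int :=
  let s1 := max x 0
  let s2 := 2 * s1 - (if x ≥ 6 then 2 else 0)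
  s1 + s2

-- ===== PRECONDITION & SPEC =====
def Spec_while03 (x : Int) (out : Int) : Prop := out = while03_alt x
instance (x : Int) (out : Int) : Decidable (Spec_while03 x out) := by unfold Spec_while03; infer_instance

-- ===== CLAIM (what is proved, stated in full; the proofs are below) =====
def Claim_equal_while03 : Prop := ∀ (x : Int), Dom_while03 x → Spec_while03 x (while03 x)

-- ===== LEMMAS AND PROOFS =====

-- invariant: the loop adds 3 per remaining iteration, minus 2 if the skipped i = 5 lies ahead
theorem while03Loop_closed (x s1 s2 i : Int) :
    while03Loop x s1 s2 i =
      s1 + s2 + 3 * max (x - i) 0 - (if i ≤ 5 ∧ 6 ≤ x then 2 else 0) := by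
  rw [while03Loop]
  by_cases h : i < x
  · by_cases h5 : i = 5
    · rw [dif_pos h, if_pos h5, while03Loop_closed x (s1 + 1) s2 (i + 1)]
      split_ifs <;> omega
    · rw [dif_pos h, if_neg h5, while03Loop_closed x (s1 + 1) (s2 + 2) (i + 1)]
      split_ifs <;> omega
  · rw [dif_neg h]
    split_ifs <;> omega
termination_by (x - i).toNat
decreasing_by all_goals omega

-- ===== VERDICT (by name: the statement is the Claim_ definition above) =====
theorem while03_spec : Claim_equal_while03 := by
  intro x _
  unfold Spec_while03 while03 while03_alt
  rw [while03Loop_closed]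
  split_ifs <;> simp <;> omega
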